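-- pv_equiv track=rewrite | github.com/Duo-Lu/CMPT310 | Assignment3/a3_q2.py | make_exactly_column_group
-- ===== SOURCE A (Python) =====
-- def make_exactly_column_group(graph, k):
--     length = len(graph)
--
--     column_list = []
--     for i in range(length):
--         append_list = []
--         for j in range(i + 1 , k * length + 1, length):
--             append_list.append(j)
--
--         column_list.append(append_list)
--
--     return column_list
-- ===== SOURCE B (Python) =====
-- def make_exactly_column_group(graph, k):
--     length = len(graph)
--     column_list = [[] for _ in range(length)]
--     for v in range(1, k * length + 1):
--         column_list[(v - 1) % length].append(v)
--     return column_list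
-- ===== Notes on version B (the rewrite author's own statement) =====
-- stated objective: alternative
-- what changed: Replaces the nested gather loops (one stepped inner range per column) with a single flat pass over range(1, k*length+1) that scatters each value into pre-allocated per-column buckets by (v-1) % length.
import Mathlib
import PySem

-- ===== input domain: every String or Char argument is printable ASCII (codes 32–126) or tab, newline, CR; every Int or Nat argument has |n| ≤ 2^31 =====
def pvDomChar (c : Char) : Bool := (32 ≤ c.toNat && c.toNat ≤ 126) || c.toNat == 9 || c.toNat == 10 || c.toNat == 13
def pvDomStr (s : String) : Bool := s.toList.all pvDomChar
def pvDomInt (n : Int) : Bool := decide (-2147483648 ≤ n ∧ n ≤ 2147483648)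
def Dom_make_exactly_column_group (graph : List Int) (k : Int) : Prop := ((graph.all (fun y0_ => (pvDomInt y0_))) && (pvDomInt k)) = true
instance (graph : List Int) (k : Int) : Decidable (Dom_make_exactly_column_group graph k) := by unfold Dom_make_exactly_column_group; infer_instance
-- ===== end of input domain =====

-- B replaces A's nested gather loops (one stepped inner range per column) with a single
-- flat scatter pass over range(1, k*length+1) into pre-allocated buckets, indexed by
-- (v-1) % length; same cost, different decomposition. B appends into its local buckets
-- in place (ported as List.modify); the equivalence is about the return value.

-- ===== PORT A =====
def make_exactly_column_group (graph : List Int) (k : Int) : List (List Int) :=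
  (PySem.List.pyRange 0 (graph.length : Int) 1).foldl
    (fun column_list i =>
      column_list ++
        [(PySem.List.pyRange (i + 1) (k * (graph.length : Int) + 1) (graph.length : Int)).foldl
          (fun append_list j => append_list ++ [j]) []]) []

-- ===== PORT B =====
-- column_list[(v-1) % length].append(v): the Python index (v-1) % length is
-- nonnegative and < length whenever the loop body runs, so .toNat is exact here.
def make_exactly_column_group_alt (graph : List Int) (k : Int) : List (List Int) :=
  (PySem.List.pyRange 1 (k * (graph.length : Int) + 1) 1).foldl
    (fun column_list v =>
      column_list.modify (PySem.Int.mod (v - 1) (graph.length : Int)).toNat (fun b => b ++ [v]))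
    (List.replicate graph.length [])

-- ===== PRECONDITION & SPEC =====
def Spec_make_exactly_column_group (graph : List Int) (k : Int) (out : List (List Int)) : Prop := out = make_exactly_column_group_alt graph k
instance (graph : List Int) (k : Int) (out : List (List Int)) : Decidable (Spec_make_exactly_column_group graph k out) := by unfold Spec_make_exactly_column_group; infer_instance

-- ===== CLAIM (what is proved, stated in full; the proofs are below) =====
def Claim_equal_make_exactly_column_group : Prop := ∀ (graph : List Int) (k : Int), Dom_make_exactly_column_group graph k → Spec_make_exactly_column_group graph k (make_exactly_column_group graph k)

-- ===== LEMMAS AND PROOFS =====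

-- appending elements one by one is append of the mapped list
lemma foldl_snoc_map {α β : Type} (f : α → β) (xs : List α) (acc : List β) :
    xs.foldl (fun l x => l ++ [f x]) acc = acc ++ xs.map f := by
  induction xs generalizing acc with
  | nil => simp
  | cons x xs ih => simp [List.foldl_cons, ih]

-- A's value as a map over the column indices
lemma A_eq (graph : List Int) (k : Int) :
    make_exactly_column_group graph k =
      (List.range graph.length).map
        (fun (i : Nat) => PySem.List.pyRange ((i : Int) + 1) (k * graph.length + 1) graph.length) := by
  unfold make_exactly_column_group
  rw [PySem.List.pyRange_zero_nat, List.foldl_map,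
      foldl_snoc_map (f := fun (i : Nat) =>
        (PySem.List.pyRange ((i : Int) + 1) (k * graph.length + 1) graph.length).foldl
          (fun l j => l ++ [j]) []),
      List.nil_append]
  refine List.map_congr_left (fun i _ => ?_)
  rw [foldl_snoc_map (f := fun (j : Int) => j)]
  simp

-- a stepped column range written as a closed-form map over the row count
lemma rowEq (n K i : Nat) (hn : 0 < n) (hi : i < n) :
    PySem.List.pyRange ((i : Int) + 1) ((K * n : Nat) + 1) (n : Int) =
      (List.range K).map (fun (t : Nat) => ((i : Int) + 1) + (n : Int) * (t : Int)) := by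
  rw [PySem.List.pyRange_of_pos _ _ (by exact_mod_cast hn)]
  rcases Nat.eq_zero_or_pos K with hK | hK
  · subst hK
    rw [if_neg (by push_cast; omega)]
  · have hiK : i + 1 < K * n + 1 := Nat.succ_lt_succ (lt_of_lt_of_le hi (Nat.le_mul_of_pos_left n hK))
    rw [if_pos (by exact_mod_cast hiK)]
    have h1 : (((K * n : Nat) : Int) + 1 - ((i : Int) + 1) + (n : Int) - 1)
        = ((n * K + (n - 1 - i) : Nat) : Int) := by
      push_cast [Nat.mul_comm n K]; omega
    rw [h1, ← Int.natCast_div]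
    have h2 : (n * K + (n - 1 - i)) / n = K := by
      rw [Nat.mul_add_div hn, Nat.div_eq_of_lt (by omega)]
      omega
    simp [h2]

-- scattering over range m into a map-over-range list of buckets
lemma scat (n : Nat) (F : Nat → List Int) (e : Nat → Int) :
    ∀ m, m ≤ n →
      (List.range m).foldl (fun cl j => cl.modify j (fun b => b ++ [e j]))
          ((List.range n).map F)
        = (List.range n).map (fun i => if i < m then F i ++ [e i] else F i) := by
  intro m
  induction m with
  | zero => intro _; simp
  | succ m ih =>
    intro hm
    rw [List.range_succ, List.foldl_append, ih (by omega)]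
    simp only [List.foldl_cons, List.foldl_nil]
    apply List.ext_getElem
    · simp [List.length_modify]
    · intro j h1 h2
      rw [List.getElem_modify]
      simp only [List.getElem_map, List.getElem_range]
      have hj : j < n := by simpa [List.length_modify] using h2
      by_cases hjm : m = j
      · subst hjm; simp
      · rw [if_neg hjm]
        by_cases hlt : j < m
        · rw [if_pos hlt, if_pos (by omega)]
        · rw [if_neg hlt, if_neg (by omega)]

-- the main scatter invariant: after K full rows, bucket i holds row list i
lemma scatter_main (n K : Nat) (hn : 0 < n) :
    (PySem.List.pyRange 1 ((K * n : Nat) + 1) 1).foldl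
        (fun cl v => cl.modify (PySem.Int.mod (v - 1) (n : Int)).toNat (fun b => b ++ [v]))
        (List.replicate n ([] : List Int))
      = (List.range n).map (fun (i : Nat) => (List.range K).map (fun (t : Nat) => ((i : Int) + 1) + (n : Int) * (t : Int))) := by
  induction K with
  | zero =>
    rw [PySem.List.pyRange_one_eq_nil (by norm_num)]
    simp [List.map_const']
  | succ K ih =>
    rw [show (((K + 1) * n : Nat) : Int) + 1 = ((K * n + n : Nat) : Int) + 1 by push_cast; ring,
        PySem.List.pyRange_one_append 1 ((K * n : Nat) + 1) (((K * n + n : Nat) : Int) + 1)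
          (by omega) (by push_cast; omega),
        List.foldl_append, ih]
    have hblock : PySem.List.pyRange ((K * n : Nat) + 1) (((K * n + n : Nat) : Int) + 1) 1
        = (List.range n).map (fun (j : Nat) => ((K * n : Nat) : Int) + 1 + (j : Int)) := by
      rw [PySem.List.pyRange_one,
        show (((K * n + n : Nat) : Int) + 1 - (((K * n : Nat) : Int) + 1)).toNat = n by omega]
    rw [hblock, List.foldl_map]
    have hcongr := PySem.List.foldl_congr_mem (List.range n)
      (fun (cl : List (List Int)) (j : Nat) =>
        cl.modify (PySem.Int.mod (((K * n : Nat) : Int) + 1 + (j : Int) - 1) (n : Int)).toNat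
          (fun b => b ++ [((K * n : Nat) : Int) + 1 + (j : Int)]))
      (fun (cl : List (List Int)) (j : Nat) =>
        cl.modify j (fun b => b ++ [((K * n : Nat) : Int) + 1 + (j : Int)]))
      ((List.range n).map (fun (i : Nat) => (List.range K).map (fun (t : Nat) => ((i : Int) + 1) + (n : Int) * (t : Int))))
      (by
        intro acc j hj
        have hjn : j < n := List.mem_range.mp hj
        have hcast : ((K * n : Nat) : Int) + 1 + (j : Int) - 1 = ((K * n + j : Nat) : Int) := by
          push_cast; ring
        have hmod : (K * n + j) % n = j := by
          rw [Nat.add_comm, Nat.add_mul_mod_self_right, Nat.mod_eq_of_lt hjn]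
        simp only [hcast, PySem.Int.mod_natCast, hmod, Int.toNat_natCast])
    rw [hcongr, scat n _ _ n le_rfl]
    refine List.map_congr_left (fun i hi => ?_)
    have hin : i < n := List.mem_range.mp hi
    rw [if_pos hin, List.range_succ, List.map_append]
    simp only [List.map_cons, List.map_nil]
    congr 2
    push_cast; ring

-- ===== VERDICT (by name: the statement is the Claim_ definition above) =====
theorem make_exactly_column_group_spec : Claim_equal_make_exactly_column_group := by
  intro graph k _
  unfold Spec_make_exactly_column_group
  rcases Nat.eq_zero_or_pos graph.length with h0 | hpos
  · rw [List.length_eq_zero_iff.mp h0]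
    simp [make_exactly_column_group, make_exactly_column_group_alt,
      PySem.List.pyRange_one_eq_nil]
  · by_cases hk : k ≤ 0
    · -- no values at all: every column is empty on both sides
      have hkn : k * (graph.length : Int) + 1 ≤ 1 := by
        nlinarith [Int.natCast_nonneg graph.length]
      rw [A_eq]
      unfold make_exactly_column_group_alt
      rw [PySem.List.pyRange_one_eq_nil (by omega)]
      simp only [List.foldl_nil]
      apply List.ext_getElem
      · simp
      · intro j h1 h2
        simp only [List.getElem_map, List.getElem_range, List.getElem_replicate]
        rw [PySem.List.pyRange_of_pos _ _ (by exact_mod_cast hpos), if_neg (by omega)]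
        simp
    · -- k > 0: closed forms of both sides agree row by row
      have hk' : (0 : Int) < k := lt_of_not_ge hk
      rw [A_eq]
      unfold make_exactly_column_group_alt
      have hstop : k * (graph.length : Int) + 1 = ((k.toNat * graph.length : Nat) : Int) + 1 := by
        rw [Nat.cast_mul, Int.toNat_of_nonneg (le_of_lt hk')]
      rw [hstop, scatter_main graph.length k.toNat hpos]
      refine List.map_congr_left (fun i hi => ?_)
      exact rowEq graph.length k.toNat i hpos (List.mem_range.mp hi)
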